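-- pv_equiv track=rewrite | github.com/maggierosa/DNN | trajectory_tools/tools.py | image_cut
-- ===== SOURCE A (Python) =====
-- import math
--
-- def factors(n):
--     "Returns the pairs of all factors of a number (n) as well as their distance, respectively"
--     results = []
--     for i in range(1, int(math.sqrt(n)) + 1):
--         if n % i == 0:
--             results.append((i, int(n/i), abs(int(n/i)-i)))
--     return results
--
-- def image_cut(n, size_diff=10):
--     "Returns the 2D dimensions with a difference less than (size_diff) that an array of size (n) can be cut into"
--     "with the least amount of loss from the array"
--     banana=0
--     while banana==0:
--         facts = factors(n)
--         mini = [j[2] for j in facts]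
--         if min(mini)<=size_diff:
--             done = facts[mini.index(min(mini))]
--             return done, done[0]*done[1]
--         n = n-1
-- ===== SOURCE B (Python) =====
-- import math
--
-- def image_cut(n, size_diff=10):
--     "Returns the 2D dimensions with a difference less than (size_diff) that an array of size (n) can be cut into"
--     "with the least amount of loss from the array"
--     while True:
--         # largest divisor of n not exceeding isqrt(n): its cofactor pair has the least difference
--         i = math.isqrt(n)
--         while n % i != 0:
--             i -= 1
--         q = n // i
--         if q - i <= size_diff:
--             return (i, q, q - i), i * q
--         n = n - 1
-- ===== Notes on version B (the rewrite author's own statement) =====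
-- stated objective: simpler
-- what changed: Instead of materialising the full list of factor pairs of n and extracting the least-difference pair with min() plus list.index plus indexing, B scans i downward from isqrt(n) and stops at the first divisor, which directly yields that pair; the outer decrement-n loop is kept.
import Mathlib
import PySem

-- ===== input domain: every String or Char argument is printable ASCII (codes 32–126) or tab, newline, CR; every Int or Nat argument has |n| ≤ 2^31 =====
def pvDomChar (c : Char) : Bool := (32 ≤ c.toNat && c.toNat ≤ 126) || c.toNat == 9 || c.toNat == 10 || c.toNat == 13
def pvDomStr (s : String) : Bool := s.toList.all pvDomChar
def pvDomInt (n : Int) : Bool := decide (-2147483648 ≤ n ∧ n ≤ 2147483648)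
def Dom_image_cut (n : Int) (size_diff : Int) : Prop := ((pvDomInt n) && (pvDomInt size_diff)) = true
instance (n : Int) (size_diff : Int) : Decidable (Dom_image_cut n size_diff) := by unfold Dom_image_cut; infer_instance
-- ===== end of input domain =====

-- B replaces A's build-all-factor-pairs + min/.index step by a downward scan from isqrt(n)
-- for the largest divisor ≤ √n (simpler; same outer while loop).

-- ===== PORT A =====
-- int(math.sqrt(n)): on the domain 0 ≤ n ≤ 2^31 the double sqrt is exact enough that
-- truncation gives the integer square root, so this port is exact there.
def pySqrt (n : Int) : Int := Int.ofNat (Nat.sqrt n.toNat)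

def factors (n : Int) : List (Int × Int × Int) :=
  -- int(n/i) is only evaluated when n % i == 0 and 1 ≤ i, where Python's float true
  -- division followed by truncation is exact and equals floor division.
  (PySem.List.pyRange 1 (pySqrt n + 1)).foldl
    (fun results i =>
      if PySem.Int.mod n i = 0 then
        results ++ [(i, PySem.Int.floordiv n i, |PySem.Int.floordiv n i - i|)]
      else results) []

-- the while loop, fuelled (it decrements n by 1 each pass, so fuel n.toNat + 1 is enough
-- on every input admitted by Pre_; the fuel-out / min([])-raises defaults are unreachable there)
def image_cut_loop (size_diff : Int) : Nat → Int → (Int × Int × Int) × Int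
  | 0, _ => ((0, 0, 0), 0)
  | fuel + 1, n =>
    let facts := factors n
    let mini := facts.map (fun j => j.2.2)
    match PySem.List.min? mini (fun v => v) with
    | none => ((0, 0, 0), 0)       -- Python: min([]) raises ValueError (outside Pre_)
    | some m =>
      if m ≤ size_diff then
        match PySem.List.index? mini m with
        | none => ((0, 0, 0), 0)   -- unreachable: m ∈ mini
        | some k =>
          match facts[k]? with
          | none => ((0, 0, 0), 0) -- unreachable: k < facts.length
          | some done => (done, done.1 * done.2.1)
      else image_cut_loop size_diff fuel (n - 1)

def image_cut (n : Int) (size_diff : Int) : (Int × Int × Int) × Int :=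
  image_cut_loop size_diff (n.toNat + 1) n

-- ===== PORT B =====
-- the inner "while n % i != 0: i -= 1" scan, by recursion on i (i = 0 would be Python's
-- ZeroDivisionError; unreachable from Pre_ since i = 1 always divides)
def find_div (n : Int) : Nat → Int
  | 0 => 0
  | i + 1 => if PySem.Int.mod n (Int.ofNat (i + 1)) = 0 then Int.ofNat (i + 1) else find_div n i

def image_cut_alt_loop (size_diff : Int) : Nat → Int → (Int × Int × Int) × Int
  | 0, _ => ((0, 0, 0), 0)
  | fuel + 1, n =>
    let i := find_div n (Nat.sqrt n.toNat)   -- math.isqrt(n)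
    let q := PySem.Int.floordiv n i
    if q - i ≤ size_diff then ((i, q, q - i), i * q)
    else image_cut_alt_loop size_diff fuel (n - 1)

def image_cut_alt (n : Int) (size_diff : Int) : (Int × Int × Int) × Int :=
  image_cut_alt_loop size_diff (n.toNat + 1) n

-- ===== PRECONDITION & SPEC =====
-- A raises exactly when n ≤ 0 (math.sqrt of a negative raises ValueError; n = 0 reaches
-- min([]) which raises ValueError) or size_diff < 0 (no factor pair can pass the test,
-- so n is decremented to 0 and min([]) raises); Pre_ excludes exactly those inputs.
def Pre_image_cut (n : Int) (size_diff : Int) : Prop := 1 ≤ n ∧ 0 ≤ size_diff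
instance (n : Int) (size_diff : Int) : Decidable (Pre_image_cut n size_diff) := by
  unfold Pre_image_cut; infer_instance
def pvWitness_image_cut : Int × Int := (12, 10)

def Spec_image_cut (n : Int) (size_diff : Int) (out : (Int × Int × Int) × Int) : Prop :=
  out = image_cut_alt n size_diff
instance (n : Int) (size_diff : Int) (out : (Int × Int × Int) × Int) :
    Decidable (Spec_image_cut n size_diff out) := by unfold Spec_image_cut; infer_instance

-- ===== CLAIM (what is proved, stated in full; the proofs are below) =====
def Claim_equal_image_cut : Prop := ∀ (n : Int) (size_diff : Int), Dom_image_cut n size_diff →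
  Pre_image_cut n size_diff → Spec_image_cut n size_diff (image_cut n size_diff)

-- ===== LEMMAS AND PROOFS =====

-- characterisation of B's divisor scan: a divisor of n in [1, s], below which nothing divides
theorem find_div_spec (n : Int) (s : Nat) (hs : 1 ≤ s) (h1 : (1 : Int) ∣ n) :
    1 ≤ find_div n s ∧ find_div n s ≤ (s : Int) ∧ find_div n s ∣ n ∧
      ∀ j : Nat, find_div n s < (j : Int) → (j : Int) ≤ (s : Int) → ¬ ((j : Int) ∣ n) := by
  induction s with
  | zero => omega
  | succ s ih =>
    by_cases hdvd : PySem.Int.mod n (Int.ofNat (s + 1)) = 0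
    · have hd : find_div n (s + 1) = Int.ofNat (s + 1) := by
        simp only [find_div]; rw [if_pos hdvd]
      refine ⟨by simp [hd], by simp [hd], ?_, ?_⟩
      · rw [hd]; exact (PySem.Int.mod_eq_zero_iff_dvd n _).mp hdvd
      · intro j hj1 hj2; rw [hd] at hj1; simp at hj1; omega
    · have hd : find_div n (s + 1) = find_div n s := by
        simp only [find_div]; rw [if_neg hdvd]
      rcases Nat.eq_or_lt_of_le hs with h | h
      · exfalso
        have : s = 0 := by omega
        subst this
        exact hdvd ((PySem.Int.mod_eq_zero_iff_dvd n 1).mpr h1)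
      · have hs' : 1 ≤ s := by omega
        obtain ⟨a, b, c, d⟩ := ih hs'
        rw [hd]
        refine ⟨a, by omega, c, ?_⟩
        intro j hj1 hj2
        rcases Nat.lt_or_ge j (s + 1) with hlt | hge
        · exact d j hj1 (by push_cast at hj2 ⊢; omega)
        · have : j = s + 1 := by push_cast at hj2; omega
          subst this
          intro hdj
          exact hdvd ((PySem.Int.mod_eq_zero_iff_dvd n _).mpr (by exact_mod_cast hdj))

-- the filtered divisor list underlying `factors` splits as pre ++ [find_div n s]
theorem divlist_split (n : Int) (s : Nat) (hs : 1 ≤ s) :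
    ∃ pre, (PySem.List.pyRange 1 ((s : Int) + 1)).filter
        (fun i => decide (PySem.Int.mod n i = 0)) = pre ++ [find_div n s] ∧
      ∀ y ∈ pre, 1 ≤ y ∧ y ∣ n ∧ y < find_div n s := by
  have h1 : (1 : Int) ∣ n := Int.one_dvd n
  have hmod1 : PySem.Int.mod n 1 = 0 := (PySem.Int.mod_eq_zero_iff_dvd n 1).mpr h1
  induction s with
  | zero => omega
  | succ s ih =>
    rcases Nat.eq_or_lt_of_le hs with h | h
    · have hs0 : s = 0 := by omega
      subst hs0
      have hfd1 : find_div n 1 = 1 := by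
        simp only [find_div]; rw [if_pos (by exact_mod_cast hmod1)]; rfl
      have hr : PySem.List.pyRange 1 (((0 + 1 : Nat) : Int) + 1) = [1] := by decide
      refine ⟨[], ?_, by simp⟩
      rw [hr, hfd1]
      simp [List.filter]
    · have hs' : 1 ≤ s := by omega
      obtain ⟨pre, heq, hpre⟩ := ih hs'
      have hfdle : find_div n s ≤ (s : Int) := (find_div_spec n s hs' h1).2.1
      have hcast : ((s + 1 : Nat) : Int) + 1 = ((s : Int) + 1) + 1 := by push_cast; ring
      rw [hcast, PySem.List.pyRange_one_succ_right (by omega), List.filter_append, heq]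
      by_cases hdvd : PySem.Int.mod n ((s : Int) + 1) = 0
      · have hdvd' : ((s : Int) + 1) ∣ n := (PySem.Int.mod_eq_zero_iff_dvd n _).mp hdvd
        have hfd : find_div n (s + 1) = (s : Int) + 1 := by
          simp only [find_div]
          rw [if_pos (by exact_mod_cast hdvd)]
          simp only [Int.ofNat_eq_natCast]; push_cast; ring
        refine ⟨pre ++ [find_div n s], by simp [hfd, hdvd'], ?_⟩
        intro y hy
        rw [hfd]
        rcases List.mem_append.mp hy with hy | hy
        · obtain ⟨a, b, c⟩ := hpre y hy
          exact ⟨a, b, by omega⟩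
        · simp at hy
          subst hy
          exact ⟨(find_div_spec n s hs' h1).1, (find_div_spec n s hs' h1).2.2.1, by omega⟩
      · have hndvd : ¬ ((s : Int) + 1) ∣ n := fun hc => hdvd ((PySem.Int.mod_eq_zero_iff_dvd n _).mpr hc)
        have hfd : find_div n (s + 1) = find_div n s := by
          simp only [find_div]
          rw [if_neg (by exact_mod_cast hdvd)]
        refine ⟨pre, by simp [hfd, hndvd], fun y hy => by rw [hfd]; exact hpre y hy⟩

-- extracting the min-diff pair from a list whose last element is the strict minimum
theorem extract_last (pre : List (Int × Int × Int)) (x : Int × Int × Int)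
    (h : ∀ y ∈ pre, x.2.2 < y.2.2) :
    PySem.List.min? ((pre ++ [x]).map (fun j => j.2.2)) (fun v => v) = some x.2.2 ∧
    PySem.List.index? ((pre ++ [x]).map (fun j => j.2.2)) x.2.2 = some pre.length ∧
    (pre ++ [x])[pre.length]? = some x := by
  have hmap : (pre ++ [x]).map (fun j => j.2.2) = pre.map (fun j => j.2.2) ++ [x.2.2] := by
    simp
  have hnotmem : x.2.2 ∉ pre.map (fun j => j.2.2) := by
    intro hc
    obtain ⟨y, hy, hyeq⟩ := List.mem_map.mp hc
    exact absurd hyeq (ne_of_gt (h y hy))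
  refine ⟨?_, ?_, ?_⟩
  · rw [hmap]
    cases pre with
    | nil => simp [PySem.List.min?_id_cons]
    | cons a t =>
      have : (a :: t).map (fun j => j.2.2) ++ [x.2.2]
           = a.2.2 :: (t.map (fun j => j.2.2) ++ [x.2.2]) := by simp
      rw [this, PySem.List.min?_id_cons, List.foldl_append]
      have hfm := PySem.List.foldl_min_mem (t.map (fun j => j.2.2)) a.2.2
      have hgt : x.2.2 < List.foldl min a.2.2 (t.map (fun j => j.2.2)) := by
        rcases hfm with hfm | hfm
        · rw [hfm]; exact h a (by simp)
        · obtain ⟨y, hy, hyeq⟩ := List.mem_map.mp hfm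
          rw [← hyeq]; exact h y (by simp [hy])
      simp [min_eq_right (le_of_lt hgt)]
  · rw [hmap, PySem.List.index?_append_singleton_self _ _ hnotmem]
    simp
  · exact List.getElem?_concat_length

-- the two loops agree step for step once 1 ≤ n
theorem loop_eq (size_diff : Int) (hsd : 0 ≤ size_diff) :
    ∀ (fuel : Nat) (n : Int), 1 ≤ n →
      image_cut_loop size_diff fuel n = image_cut_alt_loop size_diff fuel n := by
  intro fuel
  induction fuel with
  | zero => intro n _; rfl
  | succ fuel ih =>
    intro n hn
    have h1 : (1 : Int) ∣ n := Int.one_dvd n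
    have hs : 1 ≤ Nat.sqrt n.toNat := Nat.sqrt_pos.mpr (by omega)
    obtain ⟨hd1, hds, hddvd, _⟩ := find_div_spec n (Nat.sqrt n.toNat) hs h1
    obtain ⟨pre, heq, hpre⟩ := divlist_split n (Nat.sqrt n.toNat) hs
    -- abbreviations (plain terms, no `set`, so rewriting stays syntactic)
    have hdd_le : find_div n (Nat.sqrt n.toNat) * find_div n (Nat.sqrt n.toNat) ≤ n := by
      have h2 : (Nat.sqrt n.toNat) * (Nat.sqrt n.toNat) ≤ n.toNat := Nat.sqrt_le n.toNat
      have h3 : ((n.toNat : Int)) = n := by omega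
      nlinarith [hds, hd1]
    have hqd : find_div n (Nat.sqrt n.toNat) ≤ n / find_div n (Nat.sqrt n.toNat) :=
      Int.le_ediv_iff_mul_le (by omega) |>.mpr hdd_le
    have hfdiv : PySem.Int.floordiv n (find_div n (Nat.sqrt n.toNat))
        = n / find_div n (Nat.sqrt n.toNat) :=
      PySem.Int.floordiv_eq_ediv_of_pos (by omega)
    have hnd : n / find_div n (Nat.sqrt n.toNat) * find_div n (Nat.sqrt n.toNat) = n :=
      Int.ediv_mul_cancel hddvd
    have habs : |n / find_div n (Nat.sqrt n.toNat) - find_div n (Nat.sqrt n.toNat)|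
        = n / find_div n (Nat.sqrt n.toNat) - find_div n (Nat.sqrt n.toNat) :=
      abs_of_nonneg (by omega)
    have hfacts : factors n =
        pre.map (fun i => (i, PySem.Int.floordiv n i, |PySem.Int.floordiv n i - i|))
          ++ [(find_div n (Nat.sqrt n.toNat),
               PySem.Int.floordiv n (find_div n (Nat.sqrt n.toNat)),
               |PySem.Int.floordiv n (find_div n (Nat.sqrt n.toNat)) - find_div n (Nat.sqrt n.toNat)|)] := by
      unfold factors
      rw [PySem.List.foldl_append_ite (p := fun i => PySem.Int.mod n i = 0)
            (f := fun i => (i, PySem.Int.floordiv n i, |PySem.Int.floordiv n i - i|))]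
      have hps : pySqrt n = ((Nat.sqrt n.toNat : Nat) : Int) := rfl
      rw [hps, heq, List.map_append, List.nil_append]
      rfl
    have hyp : ∀ z ∈ pre.map (fun i => (i, PySem.Int.floordiv n i, |PySem.Int.floordiv n i - i|)),
        ((find_div n (Nat.sqrt n.toNat),
          PySem.Int.floordiv n (find_div n (Nat.sqrt n.toNat)),
          |PySem.Int.floordiv n (find_div n (Nat.sqrt n.toNat)) - find_div n (Nat.sqrt n.toNat)|)
            : Int × Int × Int).2.2 < z.2.2 := by
      intro z hz
      obtain ⟨y, hy, rfl⟩ := List.mem_map.mp hz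
      obtain ⟨hy1, hydvd, hylt⟩ := hpre y hy
      have hyfdiv : PySem.Int.floordiv n y = n / y := PySem.Int.floordiv_eq_ediv_of_pos (by omega)
      have hny : n / y * y = n := Int.ediv_mul_cancel hydvd
      have hyy : y * y ≤ n := by nlinarith [hdd_le]
      have hqy : y ≤ n / y := Int.le_ediv_iff_mul_le (by omega) |>.mpr hyy
      have hlt : n / find_div n (Nat.sqrt n.toNat) < n / y := by nlinarith [hqd]
      have habsy : |n / y - y| = n / y - y := abs_of_nonneg (by omega)
      simp only [hyfdiv, hfdiv, habs, habsy]
      omega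
    obtain ⟨hmin, hidx, hget⟩ := extract_last _ _ hyp
    simp only [image_cut_loop, image_cut_alt_loop]
    rw [hfacts]
    simp only [hmin, hidx, hget]
    simp only [hfdiv, habs]
    by_cases hc : n / find_div n (Nat.sqrt n.toNat) - find_div n (Nat.sqrt n.toNat) ≤ size_diff
    · rw [if_pos hc, if_pos hc]
    · rw [if_neg hc, if_neg hc]
      apply ih
      -- n = 1 would satisfy the test (pair (1,1,0) and 0 ≤ size_diff), so here 2 ≤ n
      rcases (by omega : n = 1 ∨ 2 ≤ n) with hn1 | hn2
      · exfalso
        subst hn1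
        have hfd1 : find_div 1 (Nat.sqrt (Int.toNat 1)) = 1 := by decide
        rw [hfd1] at hc
        norm_num at hc
        omega
      · omega

-- ===== VERDICT (by name: the statement is the Claim_ definition above) =====
theorem image_cut_spec : Claim_equal_image_cut := by
  intro n size_diff _ hpre
  unfold Spec_image_cut image_cut image_cut_alt
  exact loop_eq size_diff hpre.2 (n.toNat + 1) n hpre.1
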